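-- pv_equiv track=rewrite | github.com/eigenfoo/cryptics | cryptics/pdfs.py | pair_strings
-- ===== SOURCE A (Python) =====
-- from collections import Counter
-- from itertools import combinations
-- from typing import Iterable
--
-- def pair_strings(
--     strings: Iterable[str], extra_words: list[str]
-- ) -> set[tuple[str, str]]:
--     """Pairs a list of strings with extra_words."""
--     pairs: set[tuple[str, str]] = set()
--     for first, second in combinations(strings, 2):
--         # TODO: this requires _all_ of the extra words... it should be _any_
--         if Counter(first.lower().split() + extra_words) == Counter(
--             second.lower().split()
--         ):
--             pairs.add((first, second))
--     return pairs
-- ===== SOURCE B (Python) =====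
-- def pair_strings(strings, extra_words):
--     """Pairs a list of strings with extra_words."""
--     strings = list(strings)
--     words = [sorted(s.lower().split()) for s in strings]
--     index = {}  # sorted-word-tuple -> ascending positions with those words
--     for j, w in enumerate(words):
--         index.setdefault(tuple(w), []).append(j)
--     pairs = set()
--     for i, first in enumerate(strings):
--         key = tuple(sorted(words[i] + extra_words))
--         for j in index.get(key, ()):
--             if j > i:
--                 pairs.add((first, strings[j]))
--     return pairs
-- ===== Notes on version B (the rewrite author's own statement) =====
-- stated objective: faster
-- what changed: A compares word Counters for every pair of strings (O(n^2) Counter builds and comparisons); B canonicalises each string once to its sorted word list, builds a hash index from sorted(words+extra_words) keys to positions, and reads each string's partners off by one dictionary lookup.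
import Mathlib
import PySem

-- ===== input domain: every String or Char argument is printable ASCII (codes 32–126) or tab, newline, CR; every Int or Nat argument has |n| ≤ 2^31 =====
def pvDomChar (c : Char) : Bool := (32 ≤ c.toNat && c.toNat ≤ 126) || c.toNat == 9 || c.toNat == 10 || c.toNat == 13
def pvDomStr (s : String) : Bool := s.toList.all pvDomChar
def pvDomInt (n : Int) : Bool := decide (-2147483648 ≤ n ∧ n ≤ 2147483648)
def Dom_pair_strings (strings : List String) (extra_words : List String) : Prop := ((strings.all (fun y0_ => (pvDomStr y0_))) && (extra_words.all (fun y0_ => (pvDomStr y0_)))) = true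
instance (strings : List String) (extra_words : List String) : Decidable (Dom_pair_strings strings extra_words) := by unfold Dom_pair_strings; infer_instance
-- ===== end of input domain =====

-- B replaces A's all-pairs Counter comparison by a single hash index keyed on the sorted word
-- list (the canonical form of a word multiset), looking each string's partners up directly.

-- ===== PORT A =====
-- s.lower().split()
def pyWords (s : String) : List String := PySem.Str.split₀ (PySem.Str.lower s)

-- itertools.combinations(xs, 2), in iteration order
def pyCombs2 {α : Type} : List α → List (α × α)
  | [] => []
  | x :: xs => xs.map (fun y => (x, y)) ++ pyCombs2 xs

-- Python's `Counter(..) == Counter(..)` here is dict equality: same key set and equal values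
-- (order-insensitive; both counters are built from lists, so no zero counts occur)
def counterEq (d e : PySem.Dict String Int) : Bool :=
  PySem.Set.equal d.keys e.keys && d.keys.all (fun k => d.getD k 0 == e.getD k 0)

def pair_strings (strings : List String) (extra_words : List String) : List (String × String) :=
  (pyCombs2 strings).foldl
    (fun pairs fs =>
      if counterEq (PySem.Dict.counter (pyWords fs.1 ++ extra_words))
                   (PySem.Dict.counter (pyWords fs.2))
      then PySem.Set.add pairs fs else pairs)
    PySem.Set.empty

-- ===== PORT B =====
-- sorted(s.lower().split())
def sortedWords (s : String) : List String := PySem.List.sorted (pyWords s) (fun w => w)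

def pair_strings_alt (strings : List String) (extra_words : List String) : List (String × String) :=
  let words := strings.map sortedWords
  let index := (PySem.List.enumerate words).foldl
      (fun d jw => d.modify jw.2 [] (fun l => l ++ [jw.1])) PySem.Dict.empty
  (PySem.List.enumerate strings).foldl
    (fun pairs ifirst =>
      let key := PySem.List.sorted (PySem.List.pyGetD words ifirst.1 [] ++ extra_words) (fun w => w)
      (index.getD key []).foldl
        (fun pairs j =>
          if ifirst.1 < j then PySem.Set.add pairs (ifirst.2, PySem.List.pyGetD strings j "")
          else pairs)
        pairs)
    PySem.Set.empty

-- ===== PRECONDITION & SPEC =====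
def Spec_pair_strings (strings : List String) (extra_words : List String) (out : List (String × String)) : Prop := out = pair_strings_alt strings extra_words
instance (strings : List String) (extra_words : List String) (out : List (String × String)) : Decidable (Spec_pair_strings strings extra_words out) := by unfold Spec_pair_strings; infer_instance

-- ===== CLAIM (what is proved, stated in full; the proofs are below) =====
def Claim_equal_pair_strings : Prop := ∀ (strings : List String) (extra_words : List String), Dom_pair_strings strings extra_words → Spec_pair_strings strings extra_words (pair_strings strings extra_words)

-- ===== LEMMAS AND PROOFS =====

-- Counter(xs) == Counter(ys)  ⟺  xs and ys are permutations of each other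
lemma counterEq_counter_iff (xs ys : List String) :
    counterEq (PySem.Dict.counter xs) (PySem.Dict.counter ys) = true ↔ xs.Perm ys := by
  rw [List.perm_iff_count]
  unfold counterEq
  rw [Bool.and_eq_true, PySem.Set.equal_iff, List.all_eq_true]
  simp only [PySem.Dict.keys_counter, PySem.Set.mem_ofList, PySem.Dict.getD_counter, beq_iff_eq,
    Nat.cast_inj]
  constructor
  · rintro ⟨hk, hall⟩ v
    by_cases hv : v ∈ xs
    · exact hall v hv
    · have hv' : v ∉ ys := fun h => hv ((hk v).mpr h)
      rw [List.count_eq_zero.mpr hv, List.count_eq_zero.mpr hv']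
  · intro h
    refine ⟨fun x => ?_, fun k _ => h k⟩
    rw [← List.count_pos_iff, ← List.count_pos_iff, h x]

-- A's per-pair test, written as the sorted-key comparison that B performs
lemma condA_eq (e : List String) (a b : String) :
    counterEq (PySem.Dict.counter (pyWords a ++ e)) (PySem.Dict.counter (pyWords b))
      = (PySem.List.sorted (sortedWords a ++ e) (fun w => w) == sortedWords b) := by
  rw [Bool.eq_iff_iff, beq_iff_eq, counterEq_counter_iff]
  have h1 : PySem.List.sorted (sortedWords a ++ e) (fun w => w)
      = PySem.List.sorted (pyWords a ++ e) (fun w => w) :=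
    PySem.List.sorted_eq_sorted_of_perm _ _ _ (fun x y h => h)
      ((PySem.List.sorted_perm (pyWords a) (fun w => w) false).append_right e)
  rw [h1, sortedWords, PySem.List.sorted_id_eq_sorted_id_iff_perm]

-- range(k, len(s)) mapped through s[j] is s[k:]
lemma rangeMap_getD_eq_drop {α : Type} (s : List α) (d : α) :
    ∀ (k : Nat), k ≤ s.length →
      (PySem.List.pyRange (k : Int) (s.length : Int)).map (fun j => PySem.List.pyGetD s j d)
        = s.drop k := by
  intro k hk
  induction hn : s.length - k generalizing k with
  | zero =>
    have hk' : k = s.length := by omega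
    subst hk'
    rw [List.drop_length]
    have : PySem.List.pyRange (s.length : Int) (s.length : Int) = [] := by
      simp [PySem.List.pyRange]
    rw [this, List.map_nil]
  | succ m ih =>
    have hlt : k < s.length := by omega
    rw [PySem.List.pyRange_one_cons (by exact_mod_cast hlt), List.map_cons]
    have : ((k : Int) + 1) = ((k + 1 : Nat) : Int) := by push_cast; ring
    rw [this, ih (k + 1) (by omega) (by omega), List.drop_eq_getElem_cons hlt,
      PySem.List.pyGetD_natCast, List.getD_eq_getElem _ _ hlt]

-- combinations(s, 2) is, suffix by suffix, the pairs ((i, s[i]), j) with i < j < len(s)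
lemma pyCombs2_eq_flatMap (s : List String) :
    ∀ (k : Nat), k ≤ s.length →
      pyCombs2 (s.drop k) = (PySem.List.enumerate (s.drop k) (k : Int)).flatMap
        (fun x => (PySem.List.pyRange (x.1 + 1) (s.length : Int)).map
          (fun j => (x.2, PySem.List.pyGetD s j ""))) := by
  intro k hk
  induction hn : s.length - k generalizing k with
  | zero =>
    have hk' : k = s.length := by omega
    subst hk'
    rw [List.drop_length, PySem.List.enumerate_nil, List.flatMap_nil]
    rfl
  | succ m ih =>
    have hlt : k < s.length := by omega
    rw [List.drop_eq_getElem_cons hlt, PySem.List.enumerate_cons, List.flatMap_cons]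
    show (List.drop (k+1) s).map (fun y => (s[k], y)) ++ pyCombs2 (List.drop (k+1) s) = _
    have hcast : ((k : Int) + 1) = ((k + 1 : Nat) : Int) := by push_cast; ring
    rw [hcast, ← ih (k + 1) (by omega) (by omega)]
    congr 1
    rw [← rangeMap_getD_eq_drop s "" (k+1) (by omega), List.map_map]
    rfl

set_option maxHeartbeats 2000000 in
theorem pair_strings_spec : Claim_equal_pair_strings := by
  intro s e _
  unfold Spec_pair_strings pair_strings pair_strings_alt
  dsimp only
  set words := s.map sortedWords with hwords
  set index := (PySem.List.enumerate words).foldl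
      (fun d jw => d.modify jw.2 [] (fun l => l ++ [jw.1])) PySem.Dict.empty with hindex
  rw [← List.foldl_filter (p := fun fs : String × String =>
        counterEq (PySem.Dict.counter (pyWords fs.1 ++ e)) (PySem.Dict.counter (pyWords fs.2)))
      (f := PySem.Set.add)]
  have hinner : ∀ (x : ℤ × String) (init : List (String × String)),
      List.foldl (fun pairs j => if x.1 < j then PySem.Set.add pairs (x.2, PySem.List.pyGetD s j "") else pairs) init
        (index.getD (PySem.List.sorted (PySem.List.pyGetD words x.1 [] ++ e) fun w => w) [])
      = List.foldl PySem.Set.add init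
          (((index.getD (PySem.List.sorted (PySem.List.pyGetD words x.1 [] ++ e) fun w => w) []).filter
              (fun j => decide (x.1 < j))).map (fun j => (x.2, PySem.List.pyGetD s j ""))) := by
    intro x init
    rw [List.foldl_map, List.foldl_filter]
    simp only [decide_eq_true_eq]
  simp only [hinner]
  rw [← List.foldl_flatMap]
  congr 1
  have h0 := pyCombs2_eq_flatMap s 0 (Nat.zero_le _)
  simp only [List.drop_zero, Nat.cast_zero] at h0
  rw [h0, List.filter_flatMap]
  apply List.flatMap_congr
  intro x hx
  obtain ⟨k, hk, hxe⟩ := List.mem_iff_getElem.mp hx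
  rw [PySem.List.length_enumerate] at hk
  rw [PySem.List.getElem_enumerate _ _ _ (by rwa [PySem.List.length_enumerate])] at hxe
  obtain ⟨x1, x2⟩ : x.1 = (k : Int) ∧ x.2 = s[k] := by
    rw [← hxe]; constructor <;> simp
  rw [x1, x2]
  have hwj : ∀ (j : Nat) (hj : j < s.length),
      PySem.List.pyGetD words (j : Int) [] = sortedWords (s[j]'hj) := by
    intro j hj
    rw [PySem.List.pyGetD_natCast, hwords, List.getD_eq_getElem _ _ (by simpa using hj),
      List.getElem_map]
  have hM : ∀ c, index.getD c [] =
      (PySem.List.pyRange 0 (s.length : Int)).filter (fun j => PySem.List.pyGetD words j [] == c) := by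
    intro c
    have hswap : index = ((PySem.List.enumerate words).map Prod.swap).foldl
        (fun d p => d.modify p.1 [] fun l => l ++ [p.2]) PySem.Dict.empty := by
      rw [hindex, List.foldl_map]
      rfl
    rw [hswap, PySem.Dict.getD_foldl_modify_append, PySem.Dict.getD_empty, List.nil_append,
      List.filter_map, List.map_map, PySem.List.enumerate_eq_map_pyRange words ([] : List String),
      List.filter_map, List.map_map]
    have hlen : PySem.List.len words = (s.length : Int) := by
      simp [PySem.List.len, hwords]
    rw [hlen]
    simp only [Function.comp_def, Prod.fst_swap, Prod.snd_swap, List.map_id']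
  rw [hM, List.filter_filter, List.filter_map]
  rw [PySem.List.pyRange_one_append 0 ((k : Int) + 1) (s.length : Int) (by omega) (by exact_mod_cast hk),
    List.filter_append]
  have hnil : (PySem.List.pyRange 0 ((k : Int) + 1)).filter
      (fun a => decide ((k : Int) < a) &&
        (PySem.List.pyGetD words a [] == PySem.List.sorted (PySem.List.pyGetD words (k : Int) [] ++ e) fun w => w)) = [] := by
    apply List.filter_eq_nil_iff.mpr
    intro j hj
    have hj' := PySem.List.mem_pyRange_one.mp hj
    have : ¬ ((k : Int) < j) := by omega
    simp [this]
  rw [hnil, List.nil_append]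
  refine congrArg (List.map _) (List.filter_congr ?_)
  intro j hj
  have hj' := PySem.List.mem_pyRange_one.mp hj
  have hjn : j.toNat < s.length := by omega
  have hjcast : j = ((j.toNat : Nat) : Int) := by omega
  rw [hjcast, hwj k hk, hwj j.toNat hjn]
  simp only [Function.comp_apply]
  rw [PySem.List.pyGetD_natCast s, List.getD_eq_getElem _ _ hjn, condA_eq]
  have hjk : ((k : Nat) : Int) < ((j.toNat : Nat) : Int) := by omega
  simp only [hjk, decide_true, Bool.true_and]
  rw [Bool.eq_iff_iff, beq_iff_eq, beq_iff_eq]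
  exact eq_comm
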